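-- pv_equiv track=rewrite | github.com/rhetoricjames/hippoclaudus | templates/scan_conversations.py | extract_category_matches
-- ===== SOURCE A (Python) =====
-- def extract_category_matches(text, keyword_categories):
--     """Find keyword matches organized by category."""
--     text_lower = text.lower()
--     matches = {}
--     flat_matches = []
--     for category, keywords in keyword_categories.items():
--         found = [kw for kw in keywords if kw.lower() in text_lower]
--         if found:
--             matches[category] = found
--             flat_matches.extend(found)
--     return matches, flat_matches
-- ===== SOURCE B (Python) =====
-- def extract_category_matches(text, keyword_categories):
--     """Find keyword matches organized by category."""
--     text_lower = text.lower()
--     lengths = {len(kw) for kws in keyword_categories.values() for kw in kws}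
--     subs = set()
--     for L in lengths:
--         for i in range(len(text_lower) - L + 1):
--             subs.add(text_lower[i:i + L])
--     grouped = [(cat, [kw for kw in kws if kw.lower() in subs])
--                for cat, kws in keyword_categories.items()]
--     matches = {cat: found for cat, found in grouped if found}
--     flat_matches = [kw for _, found in grouped for kw in found]
--     return matches, flat_matches
-- ===== Notes on version B (the rewrite author's own statement) =====
-- stated objective: faster
-- what changed: Instead of running a separate substring search over the text for every keyword, B scans the text once per distinct keyword length, collects all substrings of those lengths into a hash set, answers every keyword by one set lookup, and rebuilds the grouped/flat outputs by comprehensions over the per-category match lists.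
import Mathlib
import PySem

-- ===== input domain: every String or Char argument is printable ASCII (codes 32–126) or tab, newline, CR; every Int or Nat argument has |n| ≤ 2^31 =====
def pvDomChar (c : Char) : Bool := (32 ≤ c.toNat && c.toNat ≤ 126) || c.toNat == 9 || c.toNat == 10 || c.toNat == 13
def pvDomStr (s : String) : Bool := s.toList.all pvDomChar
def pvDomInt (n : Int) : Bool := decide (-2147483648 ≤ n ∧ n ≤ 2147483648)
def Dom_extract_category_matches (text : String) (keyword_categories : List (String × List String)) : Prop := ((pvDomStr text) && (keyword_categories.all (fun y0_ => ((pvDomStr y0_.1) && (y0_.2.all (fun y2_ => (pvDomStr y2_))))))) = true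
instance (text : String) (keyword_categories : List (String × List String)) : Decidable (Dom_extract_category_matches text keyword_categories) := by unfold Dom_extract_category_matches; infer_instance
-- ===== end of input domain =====

-- B replaces per-keyword substring searches by one pass that collects all text substrings
-- of each distinct keyword length into a set, answering keyword queries by set lookup
-- (measured faster on the generated inputs; same return value).


-- ===== PORT A =====
-- Literal port of A: text.lower() once, then for each category filter the keywords by
-- 'kw.lower() in text_lower' (a fresh substring search per keyword).
def extract_category_matches (text : String) (keyword_categories : List (String × List String)) : (List (String × List String)) × List String :=
  let text_lower := PySem.Str.lower text
  let r := keyword_categories.foldl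
    (fun (st : PySem.Dict String (List String) × List String) p =>
      let found := p.2.filter (fun kw => PySem.Str.isIn (PySem.Str.lower kw) text_lower)
      if found.isEmpty then st else (st.1.insert p.1 found, st.2 ++ found))
    (PySem.Dict.empty, [])
  (r.1.items, r.2)

-- ===== PORT B =====
-- Literal port of B (Source B): build the set 'subs' of all substrings of text_lower whose
-- length is some keyword's length; a keyword matches iff its lowercase form is in 'subs'.
def extract_category_matches_alt (text : String) (keyword_categories : List (String × List String)) : (List (String × List String)) × List String :=
  let text_lower : List Char := PySem.Chars.lower text.toList
  let lengths : PySem.Set Int :=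
    PySem.Set.ofList (keyword_categories.flatMap (fun p => p.2.map PySem.Str.len))
  let subs : PySem.Set (List Char) := lengths.foldl
    (fun (s : PySem.Set (List Char)) (L : Int) =>
      (PySem.List.pyRange 0 (PySem.List.len text_lower - L + 1) 1).foldl
        (fun s i => PySem.Set.add s (PySem.List.slice text_lower (some i) (some (i + L)))) s)
    PySem.Set.empty
  let grouped := keyword_categories.map
    (fun p => (p.1, p.2.filter (fun kw => PySem.Set.contains subs (PySem.Chars.lower kw.toList))))
  let matched := (grouped.filter (fun q => !q.2.isEmpty)).foldl
    (fun (d : PySem.Dict String (List String)) q => d.insert q.1 q.2) PySem.Dict.empty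
  let flat_matches := grouped.flatMap (fun q => q.2)
  (matched.items, flat_matches)

-- ===== PRECONDITION & SPEC =====
def Spec_extract_category_matches (text : String) (keyword_categories : List (String × List String)) (out : (List (String × List String)) × List String) : Prop := out = extract_category_matches_alt text keyword_categories
instance (text : String) (keyword_categories : List (String × List String)) (out : (List (String × List String)) × List String) : Decidable (Spec_extract_category_matches text keyword_categories out) := by unfold Spec_extract_category_matches; infer_instance

-- ===== CLAIM (what is proved, stated in full; the proofs are below) =====
def Claim_equal_extract_category_matches : Prop := ∀ (text : String) (keyword_categories : List (String × List String)), Dom_extract_category_matches text keyword_categories → Spec_extract_category_matches text keyword_categories (extract_category_matches text keyword_categories)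

-- ===== LEMMAS AND PROOFS =====

-- membership in a fold that adds f b for each b
theorem pv_mem_foldl_add {α β : Type} [BEq α] [LawfulBEq α] (l : List β) (f : β → α)
    (s : PySem.Set α) (x : α) :
    x ∈ l.foldl (fun s b => PySem.Set.add s (f b)) s ↔ x ∈ s ∨ ∃ b ∈ l, x = f b := by
  induction l generalizing s with
  | nil => simp
  | cons b t ih =>
    simp only [List.foldl_cons, ih, PySem.Set.mem_add]
    constructor
    · rintro (( h | h) | ⟨c, hc, rfl⟩)
      · exact Or.inl h
      · exact Or.inr ⟨b, by simp, h⟩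
      · exact Or.inr ⟨c, by simp [hc], rfl⟩
    · rintro (h | ⟨c, hc, rfl⟩)
      · exact Or.inl (Or.inl h)
      · rcases List.mem_cons.mp hc with rfl | hc
        · exact Or.inl (Or.inr rfl)
        · exact Or.inr ⟨c, hc, rfl⟩

-- membership in B's substring set
theorem pv_mem_subs (tl : List Char) (lengths : List Int) (x : List Char) :
    x ∈ lengths.foldl
      (fun s L =>
        (PySem.List.pyRange 0 (PySem.List.len tl - L + 1) 1).foldl
          (fun s i => PySem.Set.add s (PySem.List.slice tl (some i) (some (i + L)))) s)
      PySem.Set.empty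
    ↔ ∃ L ∈ lengths, ∃ i ∈ PySem.List.pyRange 0 (PySem.List.len tl - L + 1) 1,
        x = PySem.List.slice tl (some i) (some (i + L)) := by
  suffices h : ∀ s : PySem.Set (List Char),
      x ∈ lengths.foldl
        (fun s L =>
          (PySem.List.pyRange 0 (PySem.List.len tl - L + 1) 1).foldl
            (fun s i => PySem.Set.add s (PySem.List.slice tl (some i) (some (i + L)))) s) s
      ↔ x ∈ s ∨ ∃ L ∈ lengths, ∃ i ∈ PySem.List.pyRange 0 (PySem.List.len tl - L + 1) 1,
          x = PySem.List.slice tl (some i) (some (i + L)) by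
    simpa [PySem.Set.empty] using h PySem.Set.empty
  induction lengths with
  | nil => simp
  | cons L t ih =>
    intro s
    simp only [List.foldl_cons, ih, pv_mem_foldl_add]
    constructor
    · rintro (h | ⟨L', hL', h⟩)
      · rcases h with h | h
        · exact Or.inl h
        · exact Or.inr ⟨L, by simp, h⟩
      · exact Or.inr ⟨L', by simp [hL'], h⟩
    · rintro (h | ⟨L', hL', h⟩)
      · exact Or.inl (Or.inl h)
      · rcases List.mem_cons.mp hL' with rfl | hL'
        · exact Or.inl (Or.inr h)
        · exact Or.inr ⟨L', hL', h⟩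

-- a nonnegative-bounds slice is an infix of the list
theorem pv_slice_infix (tl : List Char) (i L : Int) (hi : 0 ≤ i) (hL : 0 ≤ L) :
    PySem.List.slice tl (some i) (some (i + L)) <:+: tl := by
  rw [PySem.List.slice_toNat (ha := hi) (hb := by omega)]
  exact ((tl.drop i.toNat).take_prefix _).isInfix.trans (tl.drop_suffix i.toNat).isInfix

-- the key equivalence: membership in 'subs' = substring search, for any keyword
-- whose length is in 'lengths' (all lengths are nonnegative as they come from Str.len)
theorem pv_contains_eq_isIn (tl klow : List Char) (lengths : List Int)
    (hnn : ∀ L ∈ lengths, 0 ≤ L) (hmem : (klow.length : Int) ∈ lengths) :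
    PySem.Set.contains
      (lengths.foldl
        (fun s L =>
          (PySem.List.pyRange 0 (PySem.List.len tl - L + 1) 1).foldl
            (fun s i => PySem.Set.add s (PySem.List.slice tl (some i) (some (i + L)))) s)
        PySem.Set.empty) klow
    = PySem.Chars.isIn klow tl := by
  rcases hin : PySem.Chars.isIn klow tl with _ | _
  · -- not a substring: klow cannot be in subs, since every element of subs is an infix
    rw [PySem.Chars.isIn_eq_false_iff] at hin
    cases hc : PySem.Set.contains _ klow
    · rfl
    · exfalso
      rcases (pv_mem_subs tl lengths klow).mp ((PySem.Set.contains_iff _ _).mp hc) with ⟨L, hL, i, hi, rfl⟩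
      have hi' := PySem.List.mem_pyRange_one.mp hi
      exact hin (pv_slice_infix tl i L hi'.1 (hnn L hL))
  · -- a substring: the slice at its first occurrence is added to subs
    rw [PySem.Chars.isIn_iff_infix] at hin
    rcases hin with ⟨pre, suf, heq⟩
    apply (PySem.Set.contains_iff _ _).mpr
    apply (pv_mem_subs tl lengths klow).mpr
    refine ⟨(klow.length : Int), hmem, (pre.length : Int), ?_, ?_⟩
    · apply PySem.List.mem_pyRange_one.mpr
      have hlen : tl.length = pre.length + klow.length + suf.length := by
        rw [← heq]; simp; omega
      constructor
      · exact_mod_cast Int.natCast_nonneg pre.length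
      · rw [PySem.List.len_eq]; omega
    · rw [PySem.List.slice_natCast_add, ← heq]
      simp

-- the lengths list collects every keyword's length
theorem pv_len_mem (keyword_categories : List (String × List String)) (p : String × List String)
    (kw : String) (hp : p ∈ keyword_categories) (hkw : kw ∈ p.2) :
    ((PySem.Chars.lower kw.toList).length : Int)
      ∈ keyword_categories.flatMap (fun p => p.2.map PySem.Str.len) := by
  have hl : (PySem.Chars.lower kw.toList).length = kw.toList.length := by
    simp [PySem.Chars.lower]
  rw [hl]
  apply List.mem_flatMap.mpr
  exact ⟨p, hp, List.mem_map.mpr ⟨kw, hkw, (PySem.Str.len_eq kw).symm⟩⟩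

-- proof-side name for B's substring set
def pvSubs (text : String) (keyword_categories : List (String × List String)) : PySem.Set (List Char) :=
  (PySem.Set.ofList (keyword_categories.flatMap (fun p => p.2.map PySem.Str.len))).foldl
    (fun (s : PySem.Set (List Char)) (L : Int) =>
      (PySem.List.pyRange 0 (PySem.List.len (PySem.Chars.lower text.toList) - L + 1) 1).foldl
        (fun s i => PySem.Set.add s (PySem.List.slice (PySem.Chars.lower text.toList) (some i) (some (i + L)))) s)
    PySem.Set.empty

-- A's accumulator loop, from any start state, is B's map/filter/flatMap decomposition
theorem pv_fold_shape (pred : String → Bool) (kcs : List (String × List String))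
    (d : PySem.Dict String (List String)) (fl : List String) :
    kcs.foldl
      (fun (st : PySem.Dict String (List String) × List String) p =>
        let found := p.2.filter pred
        if found.isEmpty then st else (st.1.insert p.1 found, st.2 ++ found))
      (d, fl)
    = (((kcs.map (fun p => (p.1, p.2.filter pred))).filter (fun q => !q.2.isEmpty)).foldl
        (fun (d : PySem.Dict String (List String)) q => d.insert q.1 q.2) d,
       fl ++ (kcs.map (fun p => (p.1, p.2.filter pred))).flatMap (fun q => q.2)) := by
  induction kcs generalizing d fl with
  | nil => simp
  | cons p t ih =>
    simp only [List.foldl_cons, List.map_cons, List.filter_cons, List.flatMap_cons]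
    by_cases h : (p.2.filter pred).isEmpty
    · have h0 : p.2.filter pred = [] := List.isEmpty_iff.mp h
      rw [if_pos h, ih]
      simp [h0]
    · rw [if_neg h, ih]
      simp [h, List.append_assoc]

-- the two filter predicates agree on every keyword that occurs in the input
theorem pv_grouped_eq (text : String) (kcs : List (String × List String)) :
    kcs.map (fun p => (p.1, p.2.filter (fun kw => PySem.Str.isIn (PySem.Str.lower kw) (PySem.Str.lower text))))
    = kcs.map (fun p => (p.1, p.2.filter (fun kw => PySem.Set.contains (pvSubs text kcs) (PySem.Chars.lower kw.toList)))) := by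
  apply List.map_congr_left
  intro p hp
  have hf : p.2.filter (fun kw => PySem.Str.isIn (PySem.Str.lower kw) (PySem.Str.lower text))
      = p.2.filter (fun kw => PySem.Set.contains (pvSubs text kcs) (PySem.Chars.lower kw.toList)) := by
    apply List.filter_congr
    intro kw hkw
    have h := pv_contains_eq_isIn (PySem.Chars.lower text.toList) (PySem.Chars.lower kw.toList)
      (PySem.Set.ofList (kcs.flatMap (fun p => p.2.map PySem.Str.len)))
      (by
        intro L hL
        rcases List.mem_flatMap.mp ((PySem.Set.mem_ofList _ _).mp hL) with ⟨q, _, hq⟩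
        rcases List.mem_map.mp hq with ⟨kw2, _, rfl⟩
        rw [PySem.Str.len_eq]
        exact_mod_cast Int.natCast_nonneg kw2.toList.length)
      ((PySem.Set.mem_ofList _ _).mpr (pv_len_mem kcs p kw hp hkw))
    rw [show PySem.Set.contains (pvSubs text kcs) (PySem.Chars.lower kw.toList)
          = PySem.Chars.isIn (PySem.Chars.lower kw.toList) (PySem.Chars.lower text.toList) from h]
    simp [PySem.Str.isIn_eq, PySem.Str.toList_lower]
  rw [hf]

-- ===== VERDICT (by name: the statement is the Claim_ definition above) =====
theorem extract_category_matches_spec : Claim_equal_extract_category_matches := by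
  intro text kcs _
  unfold Spec_extract_category_matches
  have h := congrArg (fun r : PySem.Dict String (List String) × List String => (r.1.items, r.2))
    (pv_fold_shape (fun kw => PySem.Str.isIn (PySem.Str.lower kw) (PySem.Str.lower text)) kcs
      PySem.Dict.empty [])
  rw [pv_grouped_eq text kcs] at h
  unfold extract_category_matches extract_category_matches_alt
  exact h
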